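-- pv_equiv track=rewrite | github.com/pgarrett-scripps/peptacular | src/peptacular/utils2.py | _pop_ion_count
-- ===== SOURCE A (Python) =====
-- from typing import Optional, Tuple, Union
--
-- def _pop_ion_count(ion: str) -> Tuple[int, str]:
--     """
--     Parse the charge of an ion from a string.
--
--     :param ion: The ion string to parse.
--     :type ion: str
--
--     :return: A tuple containing the charge and the remaining ion string.
--     :rtype: Tuple[int, str]
--
--     .. code-block:: python
--
--         >>> _pop_ion_count('+H+')
--         (1, 'H+')
--
--         >>> _pop_ion_count('+2Na+')
--         (2, 'Na+')
--
--         >>> _pop_ion_count('2I-')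
--         (2, 'I-')
--
--         >>> _pop_ion_count('+e-')
--         (1, 'e-')
--
--         >>> _pop_ion_count('-2Na+')
--         (-2, 'Na+')
--
--         >>> _pop_ion_count('+2Mg2+')
--         (2, 'Mg2+')
--
--     """
--
--     count_str = ""
--
--     charge = 1
--     for i, c in enumerate(ion):
--         if c == "-":
--             charge = -1
--         elif c == "+":
--             pass
--         elif c.isdigit():
--             count_str += c
--         else:
--             cnt = int(count_str) if count_str else 1
--             return cnt * charge, ion[i:]
--
--     raise ValueError(f"Bad Ion Count: {ion}")
-- ===== SOURCE B (Python) =====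
-- def _pop_ion_count(ion):
--     # Phase 1: locate the boundary: first char that is not '+', '-' or a digit.
--     i = 0
--     n = len(ion)
--     while i < n and (ion[i] in '+-' or ion[i].isdigit()):
--         i += 1
--     if i == n:
--         raise ValueError(f"Bad Ion Count: {ion}")
--     # Phase 2: derive sign and count from the prefix.
--     prefix = ion[:i]
--     digits = ''.join(c for c in prefix if c.isdigit())
--     charge = -1 if '-' in prefix else 1
--     return (int(digits) if digits else 1) * charge, ion[i:]
-- ===== Notes on version B (the rewrite author's own statement) =====
-- stated objective: alternative
-- what changed: Replaces A's single accumulating early-return loop (building count_str and mutating charge char by char) with a two-phase computation: first locate the boundary index of the [+,-,digit] prefix, then derive charge by membership and count by filtering digits out of the prefix.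
import Mathlib
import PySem

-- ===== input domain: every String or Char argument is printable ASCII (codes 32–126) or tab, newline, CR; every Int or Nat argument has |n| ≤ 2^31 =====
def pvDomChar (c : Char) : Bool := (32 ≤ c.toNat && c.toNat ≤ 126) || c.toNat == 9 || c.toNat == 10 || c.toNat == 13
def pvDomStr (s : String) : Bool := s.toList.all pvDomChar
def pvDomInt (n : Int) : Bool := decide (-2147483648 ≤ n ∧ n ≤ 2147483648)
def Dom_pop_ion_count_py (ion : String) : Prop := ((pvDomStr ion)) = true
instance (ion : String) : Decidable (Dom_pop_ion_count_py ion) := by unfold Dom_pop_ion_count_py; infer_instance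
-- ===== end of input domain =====

-- B is the same O(n) task by a different decomposition (locate boundary, then derive); return values proved equal on Pre_.

-- shared character class: chars the prefix loop consumes ('+', '-', ASCII digit; exact on the ASCII domain)
def pvIonPrefChar (c : Char) : Bool := c == '+' || c == '-' || c.isDigit

-- ===== PORT A =====
-- A's loop: accumulate count_str, flip charge on '-', early-return at the first terminator; none = the final raise.
def popIonA : List Char → List Char → Int → Option (Int × List Char)
  | [], _, _ => none
  | c :: cs, countStr, charge =>
    if c == '-' then popIonA cs countStr (-1)
    else if c == '+' then popIonA cs countStr charge
    else if c.isDigit then popIonA cs (countStr ++ [c]) charge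
    else some ((if countStr.isEmpty then 1 else (PySem.Int.ofChars? countStr).getD 0) * charge,
               c :: cs)

def pop_ion_count_py (ion : String) : Int × String :=
  match popIonA ion.toList [] 1 with
  | some (n, rest) => (n, String.ofList rest)
  | none => (0, ion)   -- unreachable under Pre_ (Python raises ValueError here)

-- ===== PORT B =====
def pop_ion_count_py_alt (ion : String) : Int × String :=
  let cs := ion.toList
  let pre := cs.takeWhile pvIonPrefChar
  let rest := cs.dropWhile pvIonPrefChar
  match rest with
  | [] => (0, ion)   -- unreachable under Pre_ (Python raises ValueError here)
  | _ :: _ =>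
    let digits := pre.filter Char.isDigit
    let charge : Int := if '-' ∈ pre then -1 else 1
    ((if digits.isEmpty then 1 else (PySem.Int.ofChars? digits).getD 0) * charge,
     String.ofList rest)

-- ===== PRECONDITION & SPEC =====
-- Pre_ excludes exactly the inputs on which A raises ValueError: strings (incl. "") made only of '+', '-' and digits.
def Pre_pop_ion_count_py (ion : String) : Prop :=
  (ion.toList.any (fun c => !pvIonPrefChar c)) = true
instance (ion : String) : Decidable (Pre_pop_ion_count_py ion) := by
  unfold Pre_pop_ion_count_py; infer_instance

def pvWitness_pop_ion_count_py : String := "+2Na+"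

def Spec_pop_ion_count_py (ion : String) (out : Int × String) : Prop := out = pop_ion_count_py_alt ion
instance (ion : String) (out : Int × String) : Decidable (Spec_pop_ion_count_py ion out) := by unfold Spec_pop_ion_count_py; infer_instance

-- ===== CLAIM (what is proved, stated in full; the proofs are below) =====
def Claim_equal_pop_ion_count_py : Prop := ∀ (ion : String), Dom_pop_ion_count_py ion → Pre_pop_ion_count_py ion → Spec_pop_ion_count_py ion (pop_ion_count_py ion)

-- ===== LEMMAS AND PROOFS =====

-- Invariant of A's loop: on a list containing a terminator, started with accumulator `acc`
-- and pending sign `charge`, it returns exactly B's two-phase value.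
theorem popIonA_eq (cs : List Char) : ∀ (acc : List Char) (charge : Int),
    (cs.any (fun c => !pvIonPrefChar c)) = true →
    popIonA cs acc charge =
      some ((if (acc ++ (cs.takeWhile pvIonPrefChar).filter Char.isDigit).isEmpty then 1
             else (PySem.Int.ofChars?
                     (acc ++ (cs.takeWhile pvIonPrefChar).filter Char.isDigit)).getD 0) *
              (if '-' ∈ cs.takeWhile pvIonPrefChar then -1 else charge),
            cs.dropWhile pvIonPrefChar) := by
  induction cs with
  | nil => intro acc charge h; simp at h
  | cons c cs ih =>
    intro acc charge h
    by_cases hm : c = '-'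
    · subst hm
      have htail : (cs.any (fun c => !pvIonPrefChar c)) = true := by
        simpa [pvIonPrefChar] using h
      show popIonA cs acc (-1) = _
      rw [ih acc (-1) htail]
      simp [pvIonPrefChar]
    · by_cases hpl : c = '+'
      · subst hpl
        have htail : (cs.any (fun c => !pvIonPrefChar c)) = true := by
          simpa [pvIonPrefChar] using h
        show popIonA cs acc charge = _
        rw [ih acc charge htail]
        simp [pvIonPrefChar]
      · by_cases hd : c.isDigit = true
        · have hp : pvIonPrefChar c = true := by simp [pvIonPrefChar, hd]
          have htail : (cs.any (fun c => !pvIonPrefChar c)) = true := by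
            rcases List.any_eq_true.mp h with ⟨x, hx, hxt⟩
            rcases List.mem_cons.mp hx with rfl | hx
            · simp [hp] at hxt
            · exact List.any_eq_true.mpr ⟨x, hx, hxt⟩
          have hstep : popIonA (c :: cs) acc charge = popIonA cs (acc ++ [c]) charge := by
            simp [popIonA, hm, hpl, hd]
          rw [hstep, ih (acc ++ [c]) charge htail]
          have hne : ('-' : Char) ≠ c := fun hc => hm hc.symm
          simp [hp, hd, List.append_assoc, hne]
        · have hp : pvIonPrefChar c = false := by
            simp [pvIonPrefChar, hm, hpl, hd]
          have hds : c.isDigit = false := by simpa using hd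
          simp [popIonA, hm, hpl, hds, hp]

-- ===== VERDICT (by name: the statement is the Claim_ definition above) =====
theorem pop_ion_count_py_spec : Claim_equal_pop_ion_count_py := by
  intro ion _ hpre
  unfold Spec_pop_ion_count_py pop_ion_count_py pop_ion_count_py_alt
  have h := popIonA_eq ion.toList [] 1 hpre
  rw [h]
  have hrest : ion.toList.dropWhile pvIonPrefChar ≠ [] := by
    have : ∃ c ∈ ion.toList, (fun c => !pvIonPrefChar c) c = true := List.any_eq_true.mp hpre
    rcases this with ⟨c, hc, hterm⟩
    intro hnil
    have := List.dropWhile_eq_nil_iff.mp hnil c hc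
    simp [this] at hterm
  cases hr : ion.toList.dropWhile pvIonPrefChar with
  | nil => exact absurd hr hrest
  | cons r rs => simp [hr]
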